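-- pv_equiv track=rewrite | github.com/Sylwia-Lewera/CodewarsPython | 8kyu/removingElements.py | remove_every_other
-- ===== SOURCE A (Python) =====
-- def remove_every_other(my_list):
--     count = len(my_list)
--     if my_list:
--         for i in reversed(range(count)):
--             if i % 2 != 0:
--                 del my_list[i]
--         return my_list
--     else:
--         pass
-- ===== SOURCE B (Python) =====
-- def remove_every_other(my_list):
--     # forward two-pointer compaction, O(n); mutates the same list in place like A
--     if my_list:
--         j = 0
--         for i in range(0, len(my_list), 2):
--             my_list[j] = my_list[i]
--             j += 1
--         del my_list[j:]
--         return my_list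
-- ===== Notes on version B (the rewrite author's own statement) =====
-- stated objective: faster
-- what changed: Replaces A's reverse scan that deletes each odd index with del (each deletion shifts the tail, O(n^2)) by a single forward two-pointer compaction that writes every even-index element to a write cursor and truncates the tail once.
import Mathlib
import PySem

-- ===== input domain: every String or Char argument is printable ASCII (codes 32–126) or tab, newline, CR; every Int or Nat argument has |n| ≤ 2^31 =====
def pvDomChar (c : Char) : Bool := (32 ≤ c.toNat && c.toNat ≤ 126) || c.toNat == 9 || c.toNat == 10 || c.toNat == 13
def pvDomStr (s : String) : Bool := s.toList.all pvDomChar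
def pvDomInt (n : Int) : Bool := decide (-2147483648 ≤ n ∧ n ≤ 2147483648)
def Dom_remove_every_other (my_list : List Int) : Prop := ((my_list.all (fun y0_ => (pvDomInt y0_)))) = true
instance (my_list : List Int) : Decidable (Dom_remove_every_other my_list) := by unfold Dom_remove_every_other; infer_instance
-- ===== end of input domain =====

-- B replaces A's quadratic reverse delete-odd-index loop with a linear forward two-pointer
-- compaction; both mutate the caller's list in place in Python (equivalence here is about the
-- return value: none for the empty list, otherwise the even-index elements).

-- ===== PORT A =====
-- for i in reversed(range(count)): if i % 2 != 0: del my_list[i]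
-- (i is always in range when the del fires, so eraseIdx is exact)
def remove_every_other (my_list : List Int) : Option (List Int) :=
  let count : Int := my_list.length
  if my_list ≠ [] then
    some (((PySem.List.pyRange 0 count 1).reverse).foldl
      (fun st i => if PySem.Int.mod i 2 ≠ 0 then st.eraseIdx i.toNat else st) my_list)
  else
    none

-- ===== PORT B =====
-- j = 0; for i in range(0, len, 2): my_list[j] = my_list[i]; j += 1; del my_list[j:]
-- (i is always a valid nonnegative index, so the pyGetD default 0 is never used; j : Nat since j ≥ 0 throughout)
def remove_every_other_alt (my_list : List Int) : Option (List Int) :=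
  if my_list ≠ [] then
    let r := (PySem.List.pyRange 0 my_list.length 2).foldl
      (fun (p : List Int × Nat) i => (p.1.set p.2 (PySem.List.pyGetD p.1 i 0), p.2 + 1))
      (my_list, 0)
    some (r.1.take r.2)
  else
    none

-- ===== PRECONDITION & SPEC =====
def Spec_remove_every_other (my_list : List Int) (out : Option (List Int)) : Prop := out = remove_every_other_alt my_list
instance (my_list : List Int) (out : Option (List Int)) : Decidable (Spec_remove_every_other my_list out) := by unfold Spec_remove_every_other; infer_instance

-- ===== CLAIM (what is proved, stated in full; the proofs are below) =====
def Claim_equal_remove_every_other : Prop := ∀ (my_list : List Int), Dom_remove_every_other my_list → Spec_remove_every_other my_list (remove_every_other my_list)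

-- ===== LEMMAS AND PROOFS =====

-- the elements of xs at even positions (b = true) resp. odd positions (b = false)
def pvSel : Bool → List Int → List Int
  | _, [] => []
  | true, a :: t => a :: pvSel false t
  | false, _ :: t => pvSel true t

theorem length_pvSel (b : Bool) (xs : List Int) :
    (pvSel b xs).length = if b then (xs.length + 1) / 2 else xs.length / 2 := by
  induction xs generalizing b with
  | nil => cases b <;> simp [pvSel]
  | cons a t ih => cases b <;> simp [pvSel, ih] <;> omega

theorem getElem?_pvSel (b : Bool) (xs : List Int) (m : Nat) :
    (pvSel b xs)[m]? = xs[2 * m + (if b then 0 else 1)]? := by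
  induction xs generalizing b m with
  | nil => cases b <;> simp [pvSel]
  | cons a t ih =>
    cases b with
    | true =>
      cases m with
      | zero => simp [pvSel]
      | succ m =>
        rw [show pvSel true (a :: t) = a :: pvSel false t from rfl,
          List.getElem?_cons_succ, ih false m, if_pos rfl, if_neg (by simp),
          show 2 * (m + 1) + 0 = (2 * m + 1) + 1 by omega, List.getElem?_cons_succ]
    | false =>
      rw [show pvSel false (a :: t) = pvSel true t from rfl, ih true m,
        if_pos rfl, if_neg (by simp),
        show 2 * m + 1 = (2 * m + 0) + 1 by omega, List.getElem?_cons_succ]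
      norm_num

-- ===== A side =====

theorem A_foldr_eraseIdx (m k : Nat) (xs : List Int) (h : k + m = xs.length) :
    List.foldr (fun (i : Nat) st => if i % 2 ≠ 0 then st.eraseIdx i else st) xs (List.range' k m)
      = xs.take k ++ pvSel (k % 2 == 0) (xs.drop k) := by
  induction m generalizing k with
  | zero =>
    have hk : k = xs.length := by omega
    simp [hk]
    cases xs.length % 2 == 0 <;> rfl
  | succ m ih =>
    rw [List.range'_succ, List.foldr_cons, ih (k+1) (by omega)]
    have hk : k < xs.length := by omega
    have hdrop : xs.drop k = xs[k] :: xs.drop (k+1) := List.drop_eq_getElem_cons hk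
    have htake : xs.take (k+1) = xs.take k ++ [xs[k]] := by
      rw [List.take_add_one, List.getElem?_eq_getElem hk]; rfl
    rcases Nat.even_or_odd k with he | ho
    · have h0 : k % 2 = 0 := Nat.even_iff.mp he
      have h1 : (k+1) % 2 = 1 := by omega
      rw [if_neg (by omega), htake, hdrop,
          show ((k+1) % 2 == 0) = false by rw [h1]; rfl,
          show ((k) % 2 == 0) = true by rw [h0]; rfl]
      simp only [pvSel]
      rw [List.append_assoc]
      rfl
    · have h0 : k % 2 = 1 := Nat.odd_iff.mp ho
      have h1 : (k+1) % 2 = 0 := by omega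
      rw [if_pos (by omega), htake,
          show ((k+1) % 2 == 0) = true by rw [h1]; rfl,
          show ((k) % 2 == 0) = false by rw [h0]; rfl, hdrop]
      have herase : ((xs.take k ++ [xs[k]]) ++ pvSel true (xs.drop (k+1))).eraseIdx k
          = xs.take k ++ pvSel true (xs.drop (k+1)) := by
        rw [List.eraseIdx_append_of_lt_length
              (by simp; omega : k < (xs.take k ++ [xs[k]]).length),
            List.eraseIdx_append_of_length_le
              (by simp [Nat.min_eq_left (le_of_lt hk)] : (xs.take k).length ≤ k)]
        simp [Nat.min_eq_left (le_of_lt hk)]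
      rw [herase]
      simp [pvSel]

-- bridge: A's Int fold over the reversed pyRange is the Nat foldr above
theorem A_fold_bridge (xs : List Int) (n : Nat) :
    ((PySem.List.pyRange 0 (n : Int) 1).reverse).foldl
      (fun st i => if PySem.Int.mod i 2 ≠ 0 then st.eraseIdx i.toNat else st) xs
    = List.foldr (fun (i : Nat) st => if i % 2 ≠ 0 then st.eraseIdx i else st) xs (List.range' 0 n) := by
  rw [PySem.List.pyRange_one, List.foldl_reverse, List.foldr_map]
  rw [show ((n : Int) - 0).toNat = n by omega, List.range_eq_range']
  congr 1
  funext k st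
  have hm : PySem.Int.mod ((k : Nat) : Int) 2 = ((k % 2 : Nat) : Int) := by
    rw [PySem.Int.mod_eq_emod_of_pos (by norm_num)]
    push_cast; omega
  simp only [zero_add, hm, Int.toNat_natCast, ne_eq, Nat.cast_eq_zero]

-- ===== B side =====

theorem B_fold_inv (xs : List Int) (c m : Nat) (h : 2 * (m + c) ≤ xs.length + 1) :
    ((List.range' m c).map (fun k => ((2 * k : Nat) : Int))).foldl
      (fun (p : List Int × Nat) i => (p.1.set p.2 (PySem.List.pyGetD p.1 i 0), p.2 + 1))
      ((pvSel true xs).take m ++ xs.drop m, m)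
    = ((pvSel true xs).take (m + c) ++ xs.drop (m + c), m + c) := by
  induction c generalizing m with
  | zero => simp
  | succ c ih =>
    rw [List.range'_succ, List.map_cons, List.foldl_cons]
    have h2m : 2 * m < xs.length := by omega
    have hm : m < xs.length := by omega
    have hmE : m ≤ (pvSel true xs).length := by
      have hl := length_pvSel true xs
      simp at hl
      omega
    have hlen : ((pvSel true xs).take m).length = m := by
      simp [Nat.min_eq_left hmE]
    have hEm : (pvSel true xs)[m]? = some xs[2*m] := by
      rw [getElem?_pvSel, if_pos rfl, List.getElem?_eq_getElem (by omega : 2*m+0 < xs.length)]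
      simp
    have hget : PySem.List.pyGetD ((pvSel true xs).take m ++ xs.drop m) ((2*m : Nat) : Int) 0
        = xs[2*m] := by
      rw [PySem.List.pyGetD_natCast, List.getD_eq_getElem?_getD,
        List.getElem?_append_right (by rw [hlen]; omega), hlen, List.getElem?_drop,
        show m + (2*m - m) = 2*m by omega, List.getElem?_eq_getElem h2m]
      rfl
    have hset : (((pvSel true xs).take m ++ xs.drop m).set m xs[2*m], m + 1)
        = ((pvSel true xs).take (m+1) ++ xs.drop (m+1), m + 1) := by
      rw [List.set_append, if_neg (by omega), hlen, Nat.sub_self,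
        List.drop_eq_getElem_cons hm, List.set_cons_zero,
        List.take_add_one, hEm]
      simp
    simp only [hget]
    rw [hset, show m + (c + 1) = (m + 1) + c by omega]
    exact ih (m+1) (by omega)

-- pyRange with step 2 from 0 to n is the list of even naturals below n
theorem pyRange_two (n : Nat) :
    PySem.List.pyRange 0 (n : Int) 2 = (List.range' 0 ((n+1)/2)).map (fun k => ((2 * k : Nat) : Int)) := by
  rw [PySem.List.pyRange_of_pos 0 (n : Int) (by norm_num)]
  by_cases h : (0 : Int) < (n : Int)
  · rw [if_pos h, show (((n : Int) - 0 + 2 - 1) / 2).toNat = (n + 1) / 2 by omega,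
      List.range_eq_range']
    congr 1
    funext k
    push_cast
    ring
  · rw [if_neg h, show n = 0 by omega]
    simp

theorem remove_every_other_spec : Claim_equal_remove_every_other := by
  intro xs _
  unfold Spec_remove_every_other remove_every_other remove_every_other_alt
  by_cases hne : xs = []
  · subst hne; simp
  · dsimp only
    rw [if_pos hne, if_pos hne]
    rw [A_fold_bridge xs xs.length, A_foldr_eraseIdx xs.length 0 xs (by omega)]
    rw [pyRange_two xs.length]
    have hB := B_fold_inv xs ((xs.length + 1)/2) 0 (by omega)
    simp only [List.take_zero, List.drop_zero, List.nil_append, Nat.zero_add] at hB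
    rw [hB]
    have hE : (pvSel true xs).length = (xs.length + 1)/2 := by
      have hl := length_pvSel true xs
      simpa using hl
    rw [show (xs.length + 1)/2 = (pvSel true xs).length from hE.symm, List.take_length,
      List.take_left]
    simp
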